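-- pv_equiv track=rewrite | github.com/andrewcooke/choochoo | py/ch2/import_/__init__.py | count_down_version
-- ===== SOURCE A (Python) =====
-- def count_down_version(current_version, restart_minor=0, max_depth=3):
--     major, minor = current_version
--     while major >= 0:
--         while minor >= 0 and max_depth > 0:
--             yield major, minor
--             minor -= 1
--             max_depth -= 1
--         minor = restart_minor
--         major -= 1
-- ===== SOURCE B (Python) =====
-- def count_down_version(current_version, restart_minor=0, max_depth=3):
--     major, minor = current_version
--     while major >= 0 and max_depth > 0:
--         if minor >= 0:
--             yield major, minor
--             minor -= 1
--             max_depth -= 1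
--         else:
--             minor = restart_minor
--             major -= 1
-- ===== Notes on version B (the rewrite author's own statement) =====
-- stated objective: alternative
-- what changed: The nested while loops are flattened into one single-pass state machine over (major, minor, max_depth) that also stops as soon as the depth budget is spent, instead of spinning major down to -1 yielding nothing.
import Mathlib
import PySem

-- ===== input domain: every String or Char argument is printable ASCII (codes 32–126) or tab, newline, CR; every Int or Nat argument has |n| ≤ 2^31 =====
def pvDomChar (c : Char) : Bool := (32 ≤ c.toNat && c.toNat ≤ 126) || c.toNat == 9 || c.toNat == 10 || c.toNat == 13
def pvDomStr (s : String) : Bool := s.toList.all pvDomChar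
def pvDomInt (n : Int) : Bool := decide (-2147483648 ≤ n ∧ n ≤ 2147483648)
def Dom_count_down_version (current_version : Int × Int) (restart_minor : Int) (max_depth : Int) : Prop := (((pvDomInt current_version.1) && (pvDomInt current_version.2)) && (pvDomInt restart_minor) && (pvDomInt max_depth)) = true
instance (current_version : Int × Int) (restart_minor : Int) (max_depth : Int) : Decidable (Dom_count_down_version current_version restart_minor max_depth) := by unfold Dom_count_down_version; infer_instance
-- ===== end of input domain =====

-- B flattens A's two nested while loops into one single-pass state machine over
-- (major, minor, max_depth) producing the same sequence; A is a Python generator,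
-- both ports return the list of yielded pairs.
-- ===== PORT A =====
-- inner while loop of A: returns (yielded pairs, remaining max_depth)
def cdvInner (major minor max_depth : Int) : List (Int × Int) × Int :=
  if minor ≥ 0 ∧ max_depth > 0 then
    ((major, minor) :: (cdvInner major (minor - 1) (max_depth - 1)).1,
     (cdvInner major (minor - 1) (max_depth - 1)).2)
  else ([], max_depth)
termination_by max_depth.toNat
decreasing_by omega

-- outer while loop of A
def cdvOuter (major minor restart_minor max_depth : Int) : List (Int × Int) :=
  if major ≥ 0 then
    (cdvInner major minor max_depth).1 ++
      cdvOuter (major - 1) restart_minor restart_minor (cdvInner major minor max_depth).2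
  else []
termination_by (major + 1).toNat
decreasing_by omega

def count_down_version (current_version : Int × Int) (restart_minor : Int) (max_depth : Int) : List (Int × Int) :=
  cdvOuter current_version.1 current_version.2 restart_minor max_depth

-- ===== PORT B =====
-- the single flat loop of B over the state (major, minor, max_depth)
def cdvFlat (major minor restart_minor max_depth : Int) : List (Int × Int) :=
  if major ≥ 0 ∧ max_depth > 0 then
    if minor ≥ 0 then
      (major, minor) :: cdvFlat major (minor - 1) restart_minor (max_depth - 1)
    else
      cdvFlat (major - 1) restart_minor restart_minor max_depth
  else []
termination_by ((major + 1).toNat, max_depth.toNat)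
decreasing_by
  · exact Prod.Lex.right _ (by omega)
  · exact Prod.Lex.left _ _ (by omega)

def count_down_version_alt (current_version : Int × Int) (restart_minor : Int) (max_depth : Int) : List (Int × Int) :=
  cdvFlat current_version.1 current_version.2 restart_minor max_depth

-- ===== PRECONDITION & SPEC =====
def Spec_count_down_version (current_version : Int × Int) (restart_minor : Int) (max_depth : Int) (out : List (Int × Int)) : Prop := out = count_down_version_alt current_version restart_minor max_depth
instance (current_version : Int × Int) (restart_minor : Int) (max_depth : Int) (out : List (Int × Int)) : Decidable (Spec_count_down_version current_version restart_minor max_depth out) := by unfold Spec_count_down_version; infer_instance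

-- ===== CLAIM (what is proved, stated in full; the proofs are below) =====
def Claim_equal_count_down_version : Prop := ∀ (current_version : Int × Int) (restart_minor : Int) (max_depth : Int), Dom_count_down_version current_version restart_minor max_depth → Spec_count_down_version current_version restart_minor max_depth (count_down_version current_version restart_minor max_depth)

-- ===== LEMMAS AND PROOFS =====
lemma cdvInner_nonpos (major minor max_depth : Int) (h : max_depth ≤ 0) :
    cdvInner major minor max_depth = ([], max_depth) := by
  rw [cdvInner]; simp; omega

lemma cdvOuter_nonpos (major minor restart_minor max_depth : Int) (h : max_depth ≤ 0) :
    cdvOuter major minor restart_minor max_depth = [] := by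
  by_cases hm : major ≥ 0
  · rw [cdvOuter, if_pos hm, cdvInner_nonpos _ _ _ h]
    simpa using cdvOuter_nonpos (major - 1) restart_minor restart_minor max_depth h
  · rw [cdvOuter, if_neg hm]
termination_by (major + 1).toNat
decreasing_by omega

lemma cdvOuter_step (major minor restart_minor max_depth : Int)
    (hm : major ≥ 0) (hd : max_depth > 0) (hmi : minor ≥ 0) :
    cdvOuter major minor restart_minor max_depth =
      (major, minor) :: cdvOuter major (minor - 1) restart_minor (max_depth - 1) := by
  conv_lhs => rw [cdvOuter]
  rw [if_pos hm, cdvInner]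
  rw [if_pos ⟨hmi, hd⟩]
  conv_rhs => rw [cdvOuter, if_pos hm]
  simp

lemma cdvFlat_eq_cdvOuter : ∀ (a d : Nat) (major minor restart_minor max_depth : Int),
    (major + 1).toNat ≤ a → max_depth.toNat ≤ d →
    cdvFlat major minor restart_minor max_depth =
      cdvOuter major minor restart_minor max_depth := by
  intro a
  induction a with
  | zero =>
    intro d major minor r md ha _
    have hm : ¬ major ≥ 0 := by omega
    rw [cdvFlat, cdvOuter, if_neg hm]
    simp [hm]
  | succ a iha =>
    intro d
    induction d with
    | zero =>
      intro major minor r md _ hd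
      have h : md ≤ 0 := by omega
      rw [cdvFlat, cdvOuter_nonpos _ _ _ _ h]
      simp; omega
    | succ d ihd =>
      intro major minor r md ha hd
      by_cases hm : major ≥ 0
      · by_cases hmd : md > 0
        · by_cases hmi : minor ≥ 0
          · rw [cdvFlat, if_pos ⟨hm, hmd⟩, if_pos hmi,
              cdvOuter_step _ _ _ _ hm hmd hmi]
            congr 1
            exact ihd major (minor - 1) r (md - 1) ha (by omega)
          · rw [cdvFlat, if_pos ⟨hm, hmd⟩, if_neg hmi]
            rw [iha md.toNat (major - 1) r r md (by omega) (le_refl _)]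
            conv_rhs => rw [cdvOuter, if_pos hm, cdvInner]
            rw [if_neg (by omega)]
            simp
        · rw [cdvFlat, cdvOuter_nonpos _ _ _ _ (by omega)]
          simp; omega
      · rw [cdvFlat, cdvOuter, if_neg hm]
        simp [hm]

-- ===== VERDICT (by name: the statement is the Claim_ definition above) =====
theorem count_down_version_spec : Claim_equal_count_down_version := by
  intro cv r md _
  unfold Spec_count_down_version count_down_version count_down_version_alt
  exact (cdvFlat_eq_cdvOuter ((cv.1 + 1).toNat) md.toNat cv.1 cv.2 r md (le_refl _) (le_refl _)).symm
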